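-- pv_equiv track=rewrite | github.com/dhpitt/math112 | hw1_p8.py | f
-- ===== SOURCE A (Python) =====
-- def split(deck):
--     stacks = [[],[],[]]
--     for i in deck:
--         stacks[i%3].append(i)
--     return stacks
--
-- def merge(stack,loc):
--     # Shuffles the deck according to
--     # which column has your card
--     final = []
--     final = final + stack[loc]
--     if len(stack[(loc+1)%3]) > len(stack[(loc+2)%3]):
--         final = stack[(loc+1)%3] + final + stack[(loc+2)%3]
--     else:
--         final = stack[(loc+2)%3] + final + stack[(loc+1)%3]
--     return final
--
-- def f(n,deck):
--     # The same thing, but only takes n as input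
--     stacks = split(deck)
--     i = 0
--     for stack in stacks:
--         if n in stack:
--             i = stacks.index(stack)
--     deck = merge(stacks,i)
--     return deck.index(n),deck
-- ===== SOURCE B (Python) =====
-- def f(n, deck):
--     cnt = [0, 0, 0]
--     for c in deck:
--         cnt[c % 3] += 1
--     loc = n % 3
--     r1, r2 = (loc + 1) % 3, (loc + 2) % 3
--     order = [r1, loc, r2] if cnt[r1] > cnt[r2] else [r2, loc, r1]
--     merged = sorted(deck, key=lambda c: order.index(c % 3))
--     i = deck.index(n)
--     pos = cnt[order[0]] + sum(1 for c in deck[:i] if c % 3 == loc)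
--     return pos, merged
-- ===== Notes on version B (the rewrite author's own statement) =====
-- stated objective: alternative
-- what changed: B never builds the three partition stacks or scans them: it counts residues in one pass, produces the merged deck by a single stable sort of the whole deck keyed by the rank of c%3 in the flanking order, and computes the returned position as count-of-first-block plus a prefix count of same-residue cards before n's first occurrence.
import Mathlib
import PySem

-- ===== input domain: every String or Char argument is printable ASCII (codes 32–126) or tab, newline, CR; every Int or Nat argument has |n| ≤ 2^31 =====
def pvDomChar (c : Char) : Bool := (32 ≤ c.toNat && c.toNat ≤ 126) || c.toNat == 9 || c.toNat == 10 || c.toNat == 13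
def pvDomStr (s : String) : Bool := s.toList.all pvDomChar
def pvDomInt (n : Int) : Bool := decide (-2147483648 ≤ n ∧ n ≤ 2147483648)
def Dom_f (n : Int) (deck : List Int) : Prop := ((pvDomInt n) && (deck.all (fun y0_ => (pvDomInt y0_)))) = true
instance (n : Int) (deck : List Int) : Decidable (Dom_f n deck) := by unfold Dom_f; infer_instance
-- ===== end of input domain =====

-- B replaces A's bucket-and-concatenate pipeline by a counting pass, ONE stable sort of the
-- whole deck by a rank key (no partition lists are built), and a prefix count for the position
-- (objective: alternative).


-- ===== PORT A =====
def pySplit (deck : List Int) : List (List Int) :=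
  deck.foldl (fun sts i =>
    let k := (PySem.Int.mod i 3).toNat
    sts.set k (sts.getD k [] ++ [i])) [[], [], []]

def pyMerge (stack : List (List Int)) (loc : Nat) : List Int :=
  let final : List Int := []
  let final := final ++ stack.getD loc []
  if (stack.getD ((loc + 1) % 3) []).length > (stack.getD ((loc + 2) % 3) []).length then
    stack.getD ((loc + 1) % 3) [] ++ final ++ stack.getD ((loc + 2) % 3) []
  else
    stack.getD ((loc + 2) % 3) [] ++ final ++ stack.getD ((loc + 1) % 3) []

def f (n : Int) (deck : List Int) : Int × List Int :=
  let sts := pySplit deck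
  let i := sts.foldl (fun i stack =>
    if n ∈ stack then (PySem.List.index? sts stack).getD 0 else i) 0
  let d := pyMerge sts i
  (((PySem.List.index? d n).getD 0 : Nat), d)

-- ===== PORT B =====
-- counting pass; stable sort of the whole deck by the rank of c%3 in `order`
-- (order.index / cnt[...] never fail on the admitted inputs: the residues are 0,1,2; the
-- unreachable none-branches are ported with `.getD 0`); position from a prefix count.
def f_alt (n : Int) (deck : List Int) : Int × List Int :=
  let cnt := deck.foldl (fun (cnt : List Int) c =>
    let k := (PySem.Int.mod c 3).toNat
    cnt.set k (cnt.getD k 0 + 1)) [0, 0, 0]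
  let loc := PySem.Int.mod n 3
  let r1 := PySem.Int.mod (loc + 1) 3
  let r2 := PySem.Int.mod (loc + 2) 3
  let order : List Int :=
    if (PySem.List.pyGet? cnt r1).getD 0 > (PySem.List.pyGet? cnt r2).getD 0
    then [r1, loc, r2] else [r2, loc, r1]
  let merged := PySem.List.sorted deck
    (fun c => (PySem.List.index? order (PySem.Int.mod c 3)).getD 0)
  let i : Int := ((PySem.List.index? deck n).getD 0 : Nat)
  let s : Int := (PySem.List.slice deck none (some i)).foldl
    (fun acc c => if PySem.Int.mod c 3 = loc then acc + 1 else acc) 0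
  let pos := (PySem.List.pyGet? cnt ((PySem.List.pyGet? order 0).getD 0)).getD 0 + s
  (pos, merged)

-- ===== PRECONDITION & SPEC =====
-- A raises ValueError (deck.index(n)) when n is not in the deck; excluded (B raises there too).
def Pre_f (n : Int) (deck : List Int) : Prop := n ∈ deck
instance (n : Int) (deck : List Int) : Decidable (Pre_f n deck) := by unfold Pre_f; infer_instance
def pvWitness_f : Int × List Int := (4, [1, 2, 3, 4, 5, 6])

def Spec_f (n : Int) (deck : List Int) (out : Int × List Int) : Prop := out = f_alt n deck
instance (n : Int) (deck : List Int) (out : Int × List Int) : Decidable (Spec_f n deck out) := by unfold Spec_f; infer_instance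

-- ===== CLAIM (what is proved, stated in full; the proofs are below) =====
def Claim_equal_f : Prop := ∀ (n : Int) (deck : List Int), Dom_f n deck → Pre_f n deck → Spec_f n deck (f n deck)

-- ===== LEMMAS AND PROOFS =====

def filt (r : Int) (deck : List Int) : List Int :=
  deck.filter (fun c => PySem.Int.mod c 3 == r)

-- ---- A-side lemmas ----
lemma step_eq (s0 s1 s2 : List Int) (i : Int) :
    [s0, s1, s2].set (PySem.Int.mod i 3).toNat
      ([s0, s1, s2].getD (PySem.Int.mod i 3).toNat [] ++ [i])
    = if PySem.Int.mod i 3 = 0 then [s0 ++ [i], s1, s2]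
      else if PySem.Int.mod i 3 = 1 then [s0, s1 ++ [i], s2]
      else [s0, s1, s2 ++ [i]] := by
  have hm : PySem.Int.mod i 3 = i % 3 := PySem.Int.mod_eq_emod_of_pos (by norm_num)
  have h0 : 0 ≤ i % 3 := Int.emod_nonneg i (by norm_num)
  have h3 : i % 3 < 3 := Int.emod_lt_of_pos i (by norm_num)
  split_ifs with h1 h2
  · simp only [h1]; rfl
  · simp only [h2]; rfl
  · have h2' : PySem.Int.mod i 3 = 2 := by rw [hm] at h1 h2 ⊢; omega
    simp only [h2']; rfl

lemma split_aux (deck : List Int) (s0 s1 s2 : List Int) :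
    deck.foldl (fun sts i =>
      let k := (PySem.Int.mod i 3).toNat
      sts.set k (sts.getD k [] ++ [i])) [s0, s1, s2]
    = [s0 ++ filt 0 deck, s1 ++ filt 1 deck, s2 ++ filt 2 deck] := by
  induction deck generalizing s0 s1 s2 with
  | nil => simp [filt]
  | cons i t ih =>
    rw [List.foldl_cons]
    show List.foldl _
      ([s0, s1, s2].set (PySem.Int.mod i 3).toNat
        ([s0, s1, s2].getD (PySem.Int.mod i 3).toNat [] ++ [i])) t = _
    rw [step_eq]
    have hm : PySem.Int.mod i 3 = i % 3 := PySem.Int.mod_eq_emod_of_pos (by norm_num)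
    have h0 : 0 ≤ i % 3 := Int.emod_nonneg i (by norm_num)
    have h3 : i % 3 < 3 := Int.emod_lt_of_pos i (by norm_num)
    have hcase : i % 3 = 0 ∨ i % 3 = 1 ∨ i % 3 = 2 := by omega
    rcases hcase with h | h | h
    · rw [if_pos (by rw [hm]; exact h), ih]
      simp [filt, h]
    · rw [if_neg (by rw [hm]; omega), if_pos (by rw [hm]; exact h), ih]
      simp [filt, h]
    · rw [if_neg (by rw [hm]; omega), if_neg (by rw [hm]; omega), ih]
      simp [filt, h]

lemma split_eq (deck : List Int) :
    pySplit deck = [filt 0 deck, filt 1 deck, filt 2 deck] := by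
  exact split_aux deck [] [] []

lemma mem_filt {n : Int} {deck : List Int} {r : Int} :
    n ∈ filt r deck ↔ n ∈ deck ∧ PySem.Int.mod n 3 = r := by
  simp [filt]

lemma index?_append_not_mem {α : Type} [BEq α] [LawfulBEq α] (v : α) (l t : List α)
    (h : v ∉ l) :
    PySem.List.index? (l ++ t) v = (PySem.List.index? t v).map (· + l.length) := by
  induction l with
  | nil => simp
  | cons x xs ih =>
    have hx : x ≠ v := by rintro rfl; exact h (by simp)
    rw [List.cons_append, PySem.List.index?_cons_of_ne _ hx,
      ih (fun hv => h (by simp [hv]))]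
    cases PySem.List.index? t v
    · simp
    · simp; omega

lemma pos_eq (first mid last : List Int) (n : Int) (hf : n ∉ first) (hm : n ∈ mid) :
    (((List.idxOf? n (first ++ (mid ++ last))).getD 0 : Nat) : Int)
      = (first.length : Int) + (((List.idxOf? n mid).getD 0 : Nat) : Int) := by
  obtain ⟨k, hk⟩ := Option.isSome_iff_exists.mp ((PySem.List.index?_isSome_iff mid n).mpr hm)
  have h1 := index?_append_not_mem n first (mid ++ last) hf
  have h2 := PySem.List.index?_append_of_mem (v := n) last hm
  simp only [PySem.List.index?_eq_idxOf?] at h1 h2 hk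
  rw [h1, h2, hk]
  simp only [Option.map_some, Option.getD_some]
  push_cast
  ring

-- ---- B-side lemmas: stability of the insertion sort for a 3-valued key ----
lemma insertBy_all (before : Int → Int → Bool) (x : Int) (l : List Int)
    (h : ∀ y ∈ l, before x y = true) : PySem.List.insertBy before x l = x :: l := by
  cases l with
  | nil => rfl
  | cons y ys => simp [PySem.List.insertBy, h y (by simp)]

lemma insertBy_cons_neg (before : Int → Int → Bool) (x y : Int) (l : List Int)
    (hy : before x y = false) :
    PySem.List.insertBy before x (y :: l) = y :: PySem.List.insertBy before x l := by
  simp [PySem.List.insertBy, hy]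

lemma insertBy_skip (before : Int → Int → Bool) (x : Int) (l1 l2 : List Int)
    (h : ∀ y ∈ l1, before x y = false) :
    PySem.List.insertBy before x (l1 ++ l2) = l1 ++ PySem.List.insertBy before x l2 := by
  induction l1 with
  | nil => rfl
  | cons y ys ih =>
    rw [List.cons_append, insertBy_cons_neg _ _ _ _ (h y (by simp)),
      ih (fun z hz => h z (by simp [hz])), List.cons_append]

lemma ins3_aux (key : Int → Nat) (xs : List Int) (b0 b1 b2 : List Int)
    (hx : ∀ c ∈ xs, key c < 3)
    (h0 : ∀ y ∈ b0, key y = 0) (h1 : ∀ y ∈ b1, key y = 1) (h2 : ∀ y ∈ b2, key y = 2) :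
    xs.foldl (fun acc x => PySem.List.insertBy (fun a b => decide (key a < key b)) x acc)
      (b0 ++ b1 ++ b2)
    = (b0 ++ xs.filter (fun c => key c == 0)) ++ (b1 ++ xs.filter (fun c => key c == 1))
        ++ (b2 ++ xs.filter (fun c => key c == 2)) := by
  induction xs generalizing b0 b1 b2 with
  | nil => simp
  | cons x t ih =>
    rw [List.foldl_cons]
    have hk : key x = 0 ∨ key x = 1 ∨ key x = 2 := by
      have := hx x (by simp); omega
    rcases hk with h | h | h
    · have e1 : PySem.List.insertBy (fun a b => decide (key a < key b)) x (b0 ++ b1 ++ b2)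
          = (b0 ++ [x]) ++ b1 ++ b2 := by
        rw [List.append_assoc,
          insertBy_skip _ _ _ _ (fun y hy => by simp [h0 y hy, h]),
          insertBy_all _ _ _ (fun y hy => by
            rcases List.mem_append.mp hy with hy | hy
            · simp [h1 y hy, h]
            · simp [h2 y hy, h])]
        simp
      rw [e1, ih (b0 ++ [x]) b1 b2 (fun c hc => hx c (List.mem_cons_of_mem _ hc))
          (fun y hy => by rcases List.mem_append.mp hy with hy | hy
                          · exact h0 y hy
                          · simp at hy; simp [hy, h]) h1 h2]
      simp [h]
    · have e1 : PySem.List.insertBy (fun a b => decide (key a < key b)) x (b0 ++ b1 ++ b2)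
          = b0 ++ (b1 ++ [x]) ++ b2 := by
        rw [List.append_assoc, List.append_assoc,
          insertBy_skip _ _ _ _ (fun y hy => by simp [h0 y hy, h]),
          insertBy_skip _ _ _ _ (fun y hy => by simp [h1 y hy, h]),
          insertBy_all _ _ _ (fun y hy => by simp [h2 y hy, h])]
        simp
      rw [e1, ih b0 (b1 ++ [x]) b2 (fun c hc => hx c (List.mem_cons_of_mem _ hc)) h0
          (fun y hy => by rcases List.mem_append.mp hy with hy | hy
                          · exact h1 y hy
                          · simp at hy; simp [hy, h]) h2]
      simp [h]
    · have e1 : PySem.List.insertBy (fun a b => decide (key a < key b)) x (b0 ++ b1 ++ b2)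
          = b0 ++ b1 ++ (b2 ++ [x]) := by
        rw [PySem.List.insertBy_of_forall_not_before _ _ _ (fun y hy => by
          rcases List.mem_append.mp hy with hy | hy
          · rcases List.mem_append.mp hy with hy | hy
            · simp [h0 y hy, h]
            · simp [h1 y hy, h]
          · simp [h2 y hy, h])]
        simp
      rw [e1, ih b0 b1 (b2 ++ [x]) (fun c hc => hx c (List.mem_cons_of_mem _ hc)) h0 h1
          (fun y hy => by rcases List.mem_append.mp hy with hy | hy
                          · exact h2 y hy
                          · simp at hy; simp [hy, h])]
      simp [h]

lemma sorted3 (xs : List Int) (key : Int → Nat) (hx : ∀ c ∈ xs, key c < 3) :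
    PySem.List.sorted xs key false
    = xs.filter (fun c => key c == 0) ++ xs.filter (fun c => key c == 1)
        ++ xs.filter (fun c => key c == 2) := by
  rw [PySem.List.sorted_eq_foldl_insertBy]
  have := ins3_aux key xs [] [] [] hx (by simp) (by simp) (by simp)
  simpa using this

lemma merged_general (deck : List Int) (a l b : Int)
    (hal : a ≠ l) (hab : a ≠ b) (hlb : l ≠ b)
    (hcov : ∀ r : Int, 0 ≤ r → r < 3 → r = a ∨ r = l ∨ r = b) :
    PySem.List.sorted deck
      (fun c => (PySem.List.index? [a, l, b] (PySem.Int.mod c 3)).getD 0) false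
    = filt a deck ++ filt l deck ++ filt b deck := by
  have ka : (PySem.List.index? [a, l, b] a).getD 0 = 0 := by
    rw [PySem.List.index?_cons_self]; rfl
  have kl : (PySem.List.index? [a, l, b] l).getD 0 = 1 := by
    rw [PySem.List.index?_cons_of_ne _ hal, PySem.List.index?_cons_self]; rfl
  have kb : (PySem.List.index? [a, l, b] b).getD 0 = 2 := by
    rw [PySem.List.index?_cons_of_ne _ hab, PySem.List.index?_cons_of_ne _ hlb,
      PySem.List.index?_cons_self]; rfl
  have hres : ∀ c : Int, PySem.Int.mod c 3 = a ∨ PySem.Int.mod c 3 = l ∨ PySem.Int.mod c 3 = b :=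
    fun c => hcov _ (PySem.Int.mod_nonneg _ (by norm_num)) (PySem.Int.mod_lt _ (by norm_num))
  rw [sorted3 deck _ (fun c _ => by
    rcases hres c with hv | hv | hv
    · rw [hv, ka]; norm_num
    · rw [hv, kl]; norm_num
    · rw [hv, kb]; norm_num)]
  have f0 : deck.filter
      (fun c => (PySem.List.index? [a, l, b] (PySem.Int.mod c 3)).getD 0 == 0) = filt a deck := by
    unfold filt
    apply List.filter_congr
    intro c _
    rcases hres c with hv | hv | hv
    · rw [hv, ka]; simp
    · rw [hv, kl]; simp [Ne.symm hal]
    · rw [hv, kb]; simp [Ne.symm hab]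
  have f1 : deck.filter
      (fun c => (PySem.List.index? [a, l, b] (PySem.Int.mod c 3)).getD 0 == 1) = filt l deck := by
    unfold filt
    apply List.filter_congr
    intro c _
    rcases hres c with hv | hv | hv
    · rw [hv, ka]; simp [hal]
    · rw [hv, kl]; simp
    · rw [hv, kb]; simp [Ne.symm hlb]
  have f2 : deck.filter
      (fun c => (PySem.List.index? [a, l, b] (PySem.Int.mod c 3)).getD 0 == 2) = filt b deck := by
    unfold filt
    apply List.filter_congr
    intro c _
    rcases hres c with hv | hv | hv
    · rw [hv, ka]; simp [hab]
    · rw [hv, kl]; simp [hlb]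
    · rw [hv, kb]; simp
  rw [f0, f1, f2]

-- ---- B-side lemmas: the counting pass and the prefix count ----
lemma cnt_step_eq (c0 c1 c2 : Int) (i : Int) :
    [c0, c1, c2].set (PySem.Int.mod i 3).toNat
      ([c0, c1, c2].getD (PySem.Int.mod i 3).toNat 0 + 1)
    = if PySem.Int.mod i 3 = 0 then [c0 + 1, c1, c2]
      else if PySem.Int.mod i 3 = 1 then [c0, c1 + 1, c2]
      else [c0, c1, c2 + 1] := by
  have hm : PySem.Int.mod i 3 = i % 3 := PySem.Int.mod_eq_emod_of_pos (by norm_num)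
  have h0 : 0 ≤ i % 3 := Int.emod_nonneg i (by norm_num)
  have h3 : i % 3 < 3 := Int.emod_lt_of_pos i (by norm_num)
  split_ifs with h1 h2
  · simp only [h1]; rfl
  · simp only [h2]; rfl
  · have h2' : PySem.Int.mod i 3 = 2 := by rw [hm] at h1 h2 ⊢; omega
    simp only [h2']; rfl

lemma cnt_aux (deck : List Int) (c0 c1 c2 : Int) :
    deck.foldl (fun (cnt : List Int) c =>
      let k := (PySem.Int.mod c 3).toNat
      cnt.set k (cnt.getD k 0 + 1)) [c0, c1, c2]
    = [c0 + ((filt 0 deck).length : Int), c1 + ((filt 1 deck).length : Int),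
        c2 + ((filt 2 deck).length : Int)] := by
  induction deck generalizing c0 c1 c2 with
  | nil => simp [filt]
  | cons i t ih =>
    rw [List.foldl_cons]
    show List.foldl _
      ([c0, c1, c2].set (PySem.Int.mod i 3).toNat
        ([c0, c1, c2].getD (PySem.Int.mod i 3).toNat 0 + 1)) t = _
    rw [cnt_step_eq]
    have hm : PySem.Int.mod i 3 = i % 3 := PySem.Int.mod_eq_emod_of_pos (by norm_num)
    have h0 : 0 ≤ i % 3 := Int.emod_nonneg i (by norm_num)
    have h3 : i % 3 < 3 := Int.emod_lt_of_pos i (by norm_num)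
    have hcase : i % 3 = 0 ∨ i % 3 = 1 ∨ i % 3 = 2 := by omega
    rcases hcase with h | h | h
    · rw [if_pos (by rw [hm]; exact h), ih]
      simp [filt, h]
      omega
    · rw [if_neg (by rw [hm]; omega), if_pos (by rw [hm]; exact h), ih]
      simp [filt, h]
      omega
    · rw [if_neg (by rw [hm]; omega), if_neg (by rw [hm]; omega), ih]
      simp [filt, h]
      omega

lemma foldl_count (loc : Int) (l : List Int) (a : Int) :
    l.foldl (fun acc c => if PySem.Int.mod c 3 = loc then acc + 1 else acc) a
    = a + ((l.filter (fun c => PySem.Int.mod c 3 == loc)).length : Int) := by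
  induction l generalizing a with
  | nil => simp
  | cons x t ih =>
    rw [List.foldl_cons, ih, List.filter_cons]
    by_cases hx : PySem.Int.mod x 3 = loc
    · rw [if_pos hx, if_pos (by simpa using hx)]
      simp only [List.length_cons]
      push_cast
      ring
    · rw [if_neg hx, if_neg (by simpa using hx)]

lemma idx_count (deck : List Int) (n loc : Int) (hn : n ∈ deck)
    (hm : PySem.Int.mod n 3 = loc) :
    ((deck.take ((PySem.List.index? deck n).getD 0)).filter
        (fun c => PySem.Int.mod c 3 == loc)).length
    = (PySem.List.index? (filt loc deck) n).getD 0 := by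
  induction deck with
  | nil => cases hn
  | cons x t ih =>
    by_cases hx : x = n
    · subst hx
      rw [PySem.List.index?_cons_self]
      unfold filt
      rw [List.filter_cons, if_pos (by simpa using hm), PySem.List.index?_cons_self]
      rfl
    · have hnt : n ∈ t := by
        rcases List.mem_cons.mp hn with h | h
        · exact absurd h.symm hx
        · exact h
      have hnf : n ∈ filt loc t := mem_filt.mpr ⟨hnt, hm⟩
      obtain ⟨k, hk⟩ := Option.isSome_iff_exists.mp
        ((PySem.List.index?_isSome_iff t n).mpr hnt)
      obtain ⟨k', hk'⟩ := Option.isSome_iff_exists.mp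
        ((PySem.List.index?_isSome_iff (filt loc t) n).mpr hnf)
      have iht := ih hnt
      rw [hk, hk'] at iht
      rw [PySem.List.index?_cons_of_ne _ hx, hk]
      simp only [Option.map_some, Option.getD_some]
      rw [List.take_succ_cons, List.filter_cons]
      unfold filt
      rw [List.filter_cons]
      by_cases hpx : PySem.Int.mod x 3 = loc
      · rw [if_pos (by simpa using hpx), if_pos (by simpa using hpx)]
        rw [PySem.List.index?_cons_of_ne _ hx]
        have : PySem.List.index? (filt loc t) n = some k' := hk'
        unfold filt at this
        rw [this]
        simp only [Option.map_some, Option.getD_some, List.length_cons]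
        simpa [Option.getD_some] using iht
      · rw [if_neg (by simpa using hpx), if_neg (by simpa using hpx)]
        have : PySem.List.index? (filt loc t) n = some k' := hk'
        unfold filt at this
        rw [this]
        simp only [Option.getD_some]
        simpa [Option.getD_some] using iht

lemma pyGet3_0 (x y z : Int) : PySem.List.pyGet? [x, y, z] 0 = some x := rfl
lemma pyGet3_1 (x y z : Int) : PySem.List.pyGet? [x, y, z] 1 = some y := rfl
lemma pyGet3_2 (x y z : Int) : PySem.List.pyGet? [x, y, z] 2 = some z := rfl

-- ===== VERDICT (by name: the statement is the Claim_ definition above) =====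
theorem f_spec : Claim_equal_f := by
  intro n deck _ hn
  unfold Spec_f
  have h0 : 0 ≤ PySem.Int.mod n 3 := PySem.Int.mod_nonneg _ (by norm_num)
  have h3 : PySem.Int.mod n 3 < 3 := PySem.Int.mod_lt _ (by norm_num)
  have hL : PySem.Int.mod n 3 = 0 ∨ PySem.Int.mod n 3 = 1 ∨ PySem.Int.mod n 3 = 2 := by omega
  rcases hL with h | h | h
  · -- loc = 0 : first block is filt 1 or filt 2, middle filt 0
    have hn0 : n ∈ filt 0 deck := mem_filt.mpr ⟨hn, h⟩
    have hn1 : n ∉ filt 1 deck := by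
      intro hx; have := (mem_filt.mp hx).2; rw [h] at this; exact absurd this (by norm_num)
    have hn2 : n ∉ filt 2 deck := by
      intro hx; have := (mem_filt.mp hx).2; rw [h] at this; exact absurd this (by norm_num)
    have hB : f_alt n deck =
        if (filt 2 deck).length < (filt 1 deck).length then
          (((filt 1 deck).length : Int) + (((PySem.List.index? (filt 0 deck) n).getD 0 : Nat) : Int),
            filt 1 deck ++ filt 0 deck ++ filt 2 deck)
        else
          (((filt 2 deck).length : Int) + (((PySem.List.index? (filt 0 deck) n).getD 0 : Nat) : Int),
            filt 2 deck ++ filt 0 deck ++ filt 1 deck) := by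
      unfold f_alt
      rw [cnt_aux]
      simp only [zero_add, h]
      rw [(by decide : PySem.Int.mod 1 3 = 1), (by decide : PySem.Int.mod 2 3 = 2),
        pyGet3_1, pyGet3_2]
      simp only [Option.getD_some, gt_iff_lt, Nat.cast_lt]
      by_cases hc : (filt 2 deck).length < (filt 1 deck).length
      · rw [if_pos hc, if_pos hc,
          merged_general deck 1 0 2 (by norm_num) (by norm_num) (by norm_num)
            (fun r hr1 hr2 => by omega),
          pyGet3_0]
        simp only [Option.getD_some]
        rw [pyGet3_1]
        simp only [Option.getD_some]
        rw [PySem.List.slice_to deck (Int.natCast_nonneg _)]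
        simp only [Int.toNat_natCast]
        rw [foldl_count]
        simp only [zero_add]
        rw [idx_count deck n 0 hn h]
      · rw [if_neg hc, if_neg hc,
          merged_general deck 2 0 1 (by norm_num) (by norm_num) (by norm_num)
            (fun r hr1 hr2 => by omega),
          pyGet3_0]
        simp only [Option.getD_some]
        rw [pyGet3_2]
        simp only [Option.getD_some]
        rw [PySem.List.slice_to deck (Int.natCast_nonneg _)]
        simp only [Int.toNat_natCast]
        rw [foldl_count]
        simp only [zero_add]
        rw [idx_count deck n 0 hn h]
    rw [hB]
    unfold f
    rw [split_eq]
    simp only [pyMerge, List.foldl_cons, List.foldl_nil, if_pos hn0, if_neg hn1, if_neg hn2,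
      PySem.List.index?_cons_self, Option.getD_some, List.getD, List.getElem?_cons_zero,
      List.getElem?_cons_succ, List.nil_append]
    norm_num
    split_ifs with hlen
    · exact Prod.ext (pos_eq (filt 1 deck) (filt 0 deck) (filt 2 deck) n hn1 hn0) rfl
    · exact Prod.ext (pos_eq (filt 2 deck) (filt 0 deck) (filt 1 deck) n hn2 hn0) rfl
  · -- loc = 1 : middle filt 1, flanks filt 2 / filt 0
    have hn1 : n ∈ filt 1 deck := mem_filt.mpr ⟨hn, h⟩
    have hn0 : n ∉ filt 0 deck := by
      intro hx; have := (mem_filt.mp hx).2; rw [h] at this; exact absurd this (by norm_num)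
    have hn2 : n ∉ filt 2 deck := by
      intro hx; have := (mem_filt.mp hx).2; rw [h] at this; exact absurd this (by norm_num)
    have e01 : filt 0 deck ≠ filt 1 deck := by
      intro e; rw [e] at hn0; exact hn0 hn1
    have hidx : PySem.List.index? [filt 0 deck, filt 1 deck, filt 2 deck] (filt 1 deck)
        = some 1 := by
      rw [PySem.List.index?_cons_of_ne _ e01, PySem.List.index?_cons_self]; rfl
    have hB : f_alt n deck =
        if (filt 0 deck).length < (filt 2 deck).length then
          (((filt 2 deck).length : Int) + (((PySem.List.index? (filt 1 deck) n).getD 0 : Nat) : Int),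
            filt 2 deck ++ filt 1 deck ++ filt 0 deck)
        else
          (((filt 0 deck).length : Int) + (((PySem.List.index? (filt 1 deck) n).getD 0 : Nat) : Int),
            filt 0 deck ++ filt 1 deck ++ filt 2 deck) := by
      unfold f_alt
      rw [cnt_aux]
      simp only [zero_add, h]
      rw [(by decide : PySem.Int.mod (1 + 1) 3 = 2), (by decide : PySem.Int.mod (1 + 2) 3 = 0),
        pyGet3_2, pyGet3_0]
      simp only [Option.getD_some, gt_iff_lt, Nat.cast_lt]
      by_cases hc : (filt 0 deck).length < (filt 2 deck).length
      · rw [if_pos hc, if_pos hc,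
          merged_general deck 2 1 0 (by norm_num) (by norm_num) (by norm_num)
            (fun r hr1 hr2 => by omega),
          pyGet3_0]
        simp only [Option.getD_some]
        rw [pyGet3_2]
        simp only [Option.getD_some]
        rw [PySem.List.slice_to deck (Int.natCast_nonneg _)]
        simp only [Int.toNat_natCast]
        rw [foldl_count]
        simp only [zero_add]
        rw [idx_count deck n 1 hn h]
      · rw [if_neg hc, if_neg hc,
          merged_general deck 0 1 2 (by norm_num) (by norm_num) (by norm_num)
            (fun r hr1 hr2 => by omega),
          pyGet3_0]
        simp only [Option.getD_some]
        rw [pyGet3_0]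
        simp only [Option.getD_some]
        rw [PySem.List.slice_to deck (Int.natCast_nonneg _)]
        simp only [Int.toNat_natCast]
        rw [foldl_count]
        simp only [zero_add]
        rw [idx_count deck n 1 hn h]
    rw [hB]
    unfold f
    rw [split_eq]
    simp only [pyMerge, List.foldl_cons, List.foldl_nil, if_neg hn0, if_pos hn1, if_neg hn2,
      hidx, Option.getD_some, List.getD, List.getElem?_cons_zero,
      List.getElem?_cons_succ, List.nil_append]
    norm_num
    split_ifs with hlen
    · exact Prod.ext (pos_eq (filt 2 deck) (filt 1 deck) (filt 0 deck) n hn2 hn1) rfl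
    · exact Prod.ext (pos_eq (filt 0 deck) (filt 1 deck) (filt 2 deck) n hn0 hn1) rfl
  · -- loc = 2 : middle filt 2, flanks filt 0 / filt 1
    have hn2 : n ∈ filt 2 deck := mem_filt.mpr ⟨hn, h⟩
    have hn0 : n ∉ filt 0 deck := by
      intro hx; have := (mem_filt.mp hx).2; rw [h] at this; exact absurd this (by norm_num)
    have hn1 : n ∉ filt 1 deck := by
      intro hx; have := (mem_filt.mp hx).2; rw [h] at this; exact absurd this (by norm_num)
    have e02 : filt 0 deck ≠ filt 2 deck := by
      intro e; rw [e] at hn0; exact hn0 hn2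
    have e12 : filt 1 deck ≠ filt 2 deck := by
      intro e; rw [e] at hn1; exact hn1 hn2
    have hidx : PySem.List.index? [filt 0 deck, filt 1 deck, filt 2 deck] (filt 2 deck)
        = some 2 := by
      rw [PySem.List.index?_cons_of_ne _ e02, PySem.List.index?_cons_of_ne _ e12,
        PySem.List.index?_cons_self]; rfl
    have hB : f_alt n deck =
        if (filt 1 deck).length < (filt 0 deck).length then
          (((filt 0 deck).length : Int) + (((PySem.List.index? (filt 2 deck) n).getD 0 : Nat) : Int),
            filt 0 deck ++ filt 2 deck ++ filt 1 deck)
        else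
          (((filt 1 deck).length : Int) + (((PySem.List.index? (filt 2 deck) n).getD 0 : Nat) : Int),
            filt 1 deck ++ filt 2 deck ++ filt 0 deck) := by
      unfold f_alt
      rw [cnt_aux]
      simp only [zero_add, h]
      rw [(by decide : PySem.Int.mod (2 + 1) 3 = 0), (by decide : PySem.Int.mod (2 + 2) 3 = 1),
        pyGet3_0, pyGet3_1]
      simp only [Option.getD_some, gt_iff_lt, Nat.cast_lt]
      by_cases hc : (filt 1 deck).length < (filt 0 deck).length
      · rw [if_pos hc, if_pos hc,
          merged_general deck 0 2 1 (by norm_num) (by norm_num) (by norm_num)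
            (fun r hr1 hr2 => by omega),
          pyGet3_0]
        simp only [Option.getD_some]
        rw [pyGet3_0]
        simp only [Option.getD_some]
        rw [PySem.List.slice_to deck (Int.natCast_nonneg _)]
        simp only [Int.toNat_natCast]
        rw [foldl_count]
        simp only [zero_add]
        rw [idx_count deck n 2 hn h]
      · rw [if_neg hc, if_neg hc,
          merged_general deck 1 2 0 (by norm_num) (by norm_num) (by norm_num)
            (fun r hr1 hr2 => by omega),
          pyGet3_0]
        simp only [Option.getD_some]
        rw [pyGet3_1]
        simp only [Option.getD_some]
        rw [PySem.List.slice_to deck (Int.natCast_nonneg _)]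
        simp only [Int.toNat_natCast]
        rw [foldl_count]
        simp only [zero_add]
        rw [idx_count deck n 2 hn h]
    rw [hB]
    unfold f
    rw [split_eq]
    simp only [pyMerge, List.foldl_cons, List.foldl_nil, if_neg hn0, if_neg hn1, if_pos hn2,
      hidx, Option.getD_some, List.getD, List.getElem?_cons_zero,
      List.getElem?_cons_succ, List.nil_append]
    norm_num
    split_ifs with hlen
    · exact Prod.ext (pos_eq (filt 0 deck) (filt 2 deck) (filt 1 deck) n hn0 hn2) rfl
    · exact Prod.ext (pos_eq (filt 1 deck) (filt 2 deck) (filt 0 deck) n hn1 hn2) rfl
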